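-- pv_equiv track=rewrite | github.com/ruabbit233/bizytrd | nodes/node_factory.py | _sorted_params
-- ===== SOURCE A (Python) =====
-- from typing import Any
--
-- _MEDIA_UI_ORDER = {
--     "IMAGE": 0,
--     "VIDEO": 1,
--     "AUDIO": 2,
-- }
--
-- _PROMPT_KEYS = {"prompt", "text"}
--
-- _NEGATIVE_PROMPT_KEYS = {"negativeprompt", "negative_prompt"}
--
-- def _param_value(param: dict[str, Any], *names: str, default: Any = None) -> Any:
--     for name in names:
--         if name in param:
--             return param[name]
--     return default
--
-- def _widget_sort_group(param: dict[str, Any]) -> int: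
--     name = str(param.get("name") or "").strip().lower()
--     field_key = str(_param_value(param, "fieldKey", default=name) or "").strip().lower()
--
--     if name == "channel":
--         return 0
--     if name in _PROMPT_KEYS or field_key in _PROMPT_KEYS:
--         return 1
--     if name in _NEGATIVE_PROMPT_KEYS or field_key in _NEGATIVE_PROMPT_KEYS:
--         return 2
--     return 3
--
-- def _sorted_params(model_def: dict[str, Any]) -> list[dict[str, Any]]:
--     params = list(model_def.get("params", []))
--     enumerated = list(enumerate(params))
--
--     media_params = []
--     widget_params = []
--     for index, param in enumerated:
--         if _param_value(param, "type") in {"IMAGE", "VIDEO", "AUDIO"}: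
--             media_params.append((index, param))
--         else:
--             widget_params.append((index, param))
--
--     media_params.sort(
--         key=lambda item: (
--             _MEDIA_UI_ORDER.get(_param_value(item[1], "type"), len(_MEDIA_UI_ORDER)),
--             item[0],
--         )
--     )
--     widget_params.sort(
--         key=lambda item: (
--             _widget_sort_group(item[1]),
--             item[0],
--         )
--     )
--
--     return [param for _, param in media_params] + [param for _, param in widget_params]
-- ===== SOURCE B (Python) =====
-- from typing import Any
--
-- _MEDIA_UI_ORDER = {
--     "IMAGE": 0,
--     "VIDEO": 1,
--     "AUDIO": 2,
-- }
--
-- _PROMPT_KEYS = {"prompt", "text"}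
--
-- _NEGATIVE_PROMPT_KEYS = {"negativeprompt", "negative_prompt"}
--
--
-- def _param_value(param: dict[str, Any], *names: str, default: Any = None) -> Any:
--     for name in names:
--         if name in param:
--             return param[name]
--     return default
--
--
-- def _widget_sort_group(param: dict[str, Any]) -> int:
--     name = str(param.get("name") or "").strip().lower()
--     field_key = str(_param_value(param, "fieldKey", default=name) or "").strip().lower()
--
--     if name == "channel":
--         return 0
--     if name in _PROMPT_KEYS or field_key in _PROMPT_KEYS:
--         return 1
--     if name in _NEGATIVE_PROMPT_KEYS or field_key in _NEGATIVE_PROMPT_KEYS: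
--         return 2
--     return 3
--
--
-- def _rank(param: dict[str, Any]) -> int:
--     t = _param_value(param, "type")
--     if t in _MEDIA_UI_ORDER:
--         return _MEDIA_UI_ORDER[t]
--     return 3 + _widget_sort_group(param)
--
--
-- def _sorted_params(model_def: dict[str, Any]) -> list[dict[str, Any]]:
--     params = list(model_def.get("params", []))
--     ordered = sorted(enumerate(params), key=lambda ip: (_rank(ip[1]), ip[0]))
--     return [param for _, param in ordered]
-- ===== Notes on version B (the rewrite author's own statement) =====
-- stated objective: simpler
-- what changed: Replaced A's two-list partition followed by two separate tuple-key sorts with a single rank function (media types rank 0-2, widgets 3 + their group) and one sorted() call over the enumerated params.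
import Mathlib
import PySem

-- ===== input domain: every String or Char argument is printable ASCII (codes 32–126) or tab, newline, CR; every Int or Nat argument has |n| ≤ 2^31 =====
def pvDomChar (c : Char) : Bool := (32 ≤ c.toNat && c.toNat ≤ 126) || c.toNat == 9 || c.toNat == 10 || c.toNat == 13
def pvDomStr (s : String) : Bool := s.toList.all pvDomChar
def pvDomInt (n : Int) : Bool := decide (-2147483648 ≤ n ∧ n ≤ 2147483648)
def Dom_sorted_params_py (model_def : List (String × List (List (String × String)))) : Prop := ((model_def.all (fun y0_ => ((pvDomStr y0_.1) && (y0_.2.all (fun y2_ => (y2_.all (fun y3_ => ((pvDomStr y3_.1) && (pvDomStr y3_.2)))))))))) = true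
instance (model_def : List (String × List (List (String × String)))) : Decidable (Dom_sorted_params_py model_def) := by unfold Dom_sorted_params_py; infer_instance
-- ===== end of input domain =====

-- B replaces A's two-list partition and two separate sorts by one rank function and a single sort of the
-- enumerated params (objective: simpler).  Return values only; neither version mutates its argument.

-- ===== shared module helpers (the Python module's _param_value / _widget_sort_group, used by BOTH versions) =====

-- _param_value(param, name): first-match lookup in the param dict, None when absent
def pvParamValue (param : List (String × String)) (name : String) : Option String :=
  List.lookup name param

-- _widget_sort_group(param)
def pvWidgetGroup (param : List (String × String)) : Int :=
  -- str(param.get("name") or ""): `or ""` maps None to "" and is the identity on every str (s or "" == s when s ≠ "", "" or "" == "")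
  let name := PySem.Str.lower (PySem.Str.strip ((List.lookup "name" param).getD ""))
  let fieldKey := PySem.Str.lower (PySem.Str.strip ((List.lookup "fieldKey" param).getD name))
  if name == "channel" then 0
  else if name == "prompt" || name == "text" || fieldKey == "prompt" || fieldKey == "text" then 1
  else if name == "negativeprompt" || name == "negative_prompt"
       || fieldKey == "negativeprompt" || fieldKey == "negative_prompt" then 2
  else 3

-- ===== PORT A =====

-- _param_value(param, "type") in {"IMAGE", "VIDEO", "AUDIO"}
def pvIsMedia (param : List (String × String)) : Bool :=
  pvParamValue param "type" == some "IMAGE" || pvParamValue param "type" == some "VIDEO"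
    || pvParamValue param "type" == some "AUDIO"

-- _MEDIA_UI_ORDER.get(_param_value(param, "type"), len(_MEDIA_UI_ORDER)): lookup in the 3-entry literal dict, default 3
def pvMediaOrder (param : List (String × String)) : Int :=
  let t := pvParamValue param "type"
  if t == some "IMAGE" then 0
  else if t == some "VIDEO" then 1
  else if t == some "AUDIO" then 2
  else 3

def sorted_params_py (model_def : List (String × List (List (String × String)))) : List (List (String × String)) :=
  let params := (List.lookup "params" model_def).getD []
  let enumerated := PySem.List.enumerate params
  let mw := enumerated.foldl
    (fun acc ip => if pvIsMedia ip.2 then (acc.1 ++ [ip], acc.2) else (acc.1, acc.2 ++ [ip]))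
    ([], [])
  let mediaSorted := PySem.List.sorted2 mw.1 (fun item => pvMediaOrder item.2) (fun item => item.1)
  let widgetSorted := PySem.List.sorted2 mw.2 (fun item => pvWidgetGroup item.2) (fun item => item.1)
  mediaSorted.map (·.2) ++ widgetSorted.map (·.2)

-- ===== PORT B =====

-- _rank(param): position of the type in _MEDIA_UI_ORDER, else 3 + _widget_sort_group(param)
def pvRank (param : List (String × String)) : Int :=
  let t := pvParamValue param "type"
  if t == some "IMAGE" then 0
  else if t == some "VIDEO" then 1
  else if t == some "AUDIO" then 2
  else 3 + pvWidgetGroup param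

def sorted_params_py_alt (model_def : List (String × List (List (String × String)))) : List (List (String × String)) :=
  let params := (List.lookup "params" model_def).getD []
  let ordered := PySem.List.sorted2 (PySem.List.enumerate params)
    (fun ip => pvRank ip.2) (fun ip => ip.1)
  ordered.map (·.2)

-- ===== PRECONDITION & SPEC =====
def Spec_sorted_params_py (model_def : List (String × List (List (String × String)))) (out : List (List (String × String))) : Prop := out = sorted_params_py_alt model_def
instance (model_def : List (String × List (List (String × String)))) (out : List (List (String × String))) : Decidable (Spec_sorted_params_py model_def out) := by unfold Spec_sorted_params_py; infer_instance

-- ===== CLAIM (what is proved, stated in full; the proofs are below) =====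
def Claim_equal_sorted_params_py : Prop := ∀ (model_def : List (String × List (List (String × String)))), Dom_sorted_params_py model_def → Spec_sorted_params_py model_def (sorted_params_py model_def)

-- ===== LEMMAS AND PROOFS =====

-- insertBy only ever compares the inserted element with members of the accumulator
theorem pv_insertBy_congr {α : Type} (f g : α → α → Bool) (x : α) (acc : List α)
    (h : ∀ a ∈ acc, f x a = g x a) :
    PySem.List.insertBy f x acc = PySem.List.insertBy g x acc := by
  induction acc with
  | nil => rfl
  | cons y ys ih =>
    simp only [PySem.List.insertBy]
    rw [h y (by simp)]
    split
    · rfl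
    · rw [ih (fun a ha => h a (by simp [ha]))]

theorem pv_foldl_insertBy_congr {α : Type} (f g : α → α → Bool) (xs acc : List α)
    (h : ∀ x ∈ xs, ∀ a, (a ∈ acc ∨ a ∈ xs) → f x a = g x a) :
    xs.foldl (fun acc x => PySem.List.insertBy f x acc) acc
      = xs.foldl (fun acc x => PySem.List.insertBy g x acc) acc := by
  induction xs generalizing acc with
  | nil => rfl
  | cons y ys ih =>
    simp only [List.foldl_cons]
    rw [pv_insertBy_congr f g y acc (fun a ha => h y (by simp) a (Or.inl ha))]
    exact ih _ (fun x hx a ha => by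
      rcases ha with ha | ha
      · rcases (PySem.List.mem_insertBy _ _ _ _).1 ha with rfl | ha
        · exact h x (by simp [hx]) a (Or.inr (by simp))
        · exact h x (by simp [hx]) a (Or.inl ha)
      · exact h x (by simp [hx]) a (Or.inr (by simp [ha])))

-- a sorted2 (tuple key) is a sorted (single key) when the keys order pairs of list members identically
theorem pv_sorted2_eq_sorted {α : Type} (xs : List α) (k1 k2 key : α → Int)
    (h : ∀ a ∈ xs, ∀ b ∈ xs,
      (decide (k1 a < k1 b) || (!decide (k1 b < k1 a) && decide (k2 a < k2 b)))
        = decide (key a < key b)) :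
    PySem.List.sorted2 xs k1 k2 = PySem.List.sorted xs key := by
  simp only [PySem.List.sorted2, PySem.List.sorted, if_neg (by decide : ¬ (false = true))]
  exact pv_foldl_insertBy_congr _ _ xs []
    (fun x hx a ha => h x hx a (by simpa using ha))

-- the lexicographic tuple (r, i) with 0 ≤ i < n orders exactly like the affine key r*n + i
theorem pv_lex_affine (ra rb ia ib n : Int) (h1 : 0 ≤ ia) (h2 : ia < n) (h3 : 0 ≤ ib) (h4 : ib < n) :
    (decide (ra < rb) || (!decide (rb < ra) && decide (ia < ib)))
      = decide (ra * n + ia < rb * n + ib) := by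
  rcases lt_trichotomy ra rb with h | h | h
  · have h5 : ra * n + n ≤ rb * n := by nlinarith
    simp only [decide_eq_true h, Bool.true_or]
    exact (decide_eq_true (by omega)).symm
  · subst h
    simp only [lt_irrefl, decide_false, Bool.false_or, Bool.not_false, Bool.true_and]
    congr 1
    simp only [eq_iff_iff]
    omega
  · have h5 : rb * n + n ≤ ra * n := by nlinarith
    simp only [decide_eq_false (lt_asymm h), decide_eq_true h, Bool.not_true, Bool.false_and,
      Bool.or_false]
    exact (decide_eq_false (by omega)).symm

-- the affine key determines the index component
theorem pv_affine_index (ma mb ia ib n : Int) (h1 : 0 ≤ ia) (h2 : ia < n) (h3 : 0 ≤ ib) (h4 : ib < n)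
    (heq : ma * n + ia = mb * n + ib) : ia = ib := by
  rcases lt_trichotomy ma mb with h | h | h
  · nlinarith
  · rw [h] at heq; linarith
  · nlinarith

-- rank facts
theorem pv_rank_media (p : List (String × String)) (h : pvIsMedia p = true) :
    pvRank p = pvMediaOrder p ∧ 0 ≤ pvMediaOrder p ∧ pvMediaOrder p ≤ 2 := by
  unfold pvIsMedia at h
  unfold pvRank pvMediaOrder
  dsimp only
  split_ifs with h1 h2 h3 <;> norm_num
  simp [h1, h2, h3] at h

theorem pv_rank_widget (p : List (String × String)) (h : pvIsMedia p = false) :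
    pvRank p = 3 + pvWidgetGroup p := by
  simp only [pvIsMedia, Bool.or_eq_false_iff] at h
  simp only [pvRank, h.1.1, h.1.2, h.2, if_false, Bool.false_eq_true]

theorem pv_widgetGroup_bounds (p : List (String × String)) :
    0 ≤ pvWidgetGroup p ∧ pvWidgetGroup p ≤ 3 := by
  dsimp only [pvWidgetGroup]
  split_ifs <;> norm_num

-- the partition loop is two filters
theorem pv_partition_foldl {α : Type} (q : α → Bool) (xs accM accW : List α) :
    xs.foldl (fun acc x => if q x then (acc.1 ++ [x], acc.2) else (acc.1, acc.2 ++ [x])) (accM, accW)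
      = (accM ++ xs.filter q, accW ++ xs.filter (fun x => !q x)) := by
  induction xs generalizing accM accW with
  | nil => simp
  | cons y ys ih =>
    by_cases hq : q y
    · simp [hq, ih]
    · simp [hq, ih]

-- bounds for members of the enumeration
theorem pv_mem_enumerate_bounds {α : Type} (xs : List α) (ip : Int × α)
    (h : ip ∈ PySem.List.enumerate xs) : 0 ≤ ip.1 ∧ ip.1 < (xs.length : Int) := by
  rcases (PySem.List.mem_enumerate_iff _ _ _).1 h with ⟨k, hk, rfl⟩
  constructor
  · simp
  · simpa using (by exact_mod_cast hk : (k : Int) < (xs.length : Int))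

-- the core fact, stated on the parameter list alone
set_option maxHeartbeats 2000000 in
theorem pv_core (params : List (List (String × String))) :
    (PySem.List.sorted2 (PySem.List.enumerate params) (fun ip => pvRank ip.2) (fun ip => ip.1)).map (·.2)
      = (PySem.List.sorted2
            ((PySem.List.enumerate params).filter (fun ip => pvIsMedia ip.2))
            (fun item => pvMediaOrder item.2) (fun item => item.1)).map (·.2)
        ++ (PySem.List.sorted2
            ((PySem.List.enumerate params).filter (fun ip => !pvIsMedia ip.2))
            (fun item => pvWidgetGroup item.2) (fun item => item.1)).map (·.2) := by
  set n : Int := (params.length : Int) with hn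
  set E := PySem.List.enumerate params with hE
  set M := E.filter (fun ip => pvIsMedia ip.2) with hM
  set W := E.filter (fun ip => !pvIsMedia ip.2) with hW
  have hMe : ∀ ip ∈ M, ip ∈ E ∧ pvIsMedia ip.2 = true := by
    intro ip h
    rw [hM, List.mem_filter] at h
    exact h
  have hWe : ∀ ip ∈ W, ip ∈ E ∧ pvIsMedia ip.2 = false := by
    intro ip h
    rw [hW, List.mem_filter] at h
    exact ⟨h.1, by simpa using h.2⟩
  have hEb : ∀ ip ∈ E, 0 ≤ ip.1 ∧ ip.1 < n := fun ip h => pv_mem_enumerate_bounds params ip h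
  -- replace all three tuple-key sorts by single affine-key sorts
  have hB : PySem.List.sorted2 E (fun ip => pvRank ip.2) (fun ip => ip.1)
      = PySem.List.sorted E (fun ip => pvRank ip.2 * n + ip.1) := by
    refine pv_sorted2_eq_sorted _ _ _ _ (fun a ha b hb => ?_)
    exact pv_lex_affine _ _ _ _ n (hEb a ha).1 (hEb a ha).2 (hEb b hb).1 (hEb b hb).2
  have hMs : PySem.List.sorted2 M (fun item => pvMediaOrder item.2) (fun item => item.1)
      = PySem.List.sorted M (fun item => pvMediaOrder item.2 * n + item.1) := by
    refine pv_sorted2_eq_sorted _ _ _ _ (fun a ha b hb => ?_)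
    exact pv_lex_affine _ _ _ _ n (hEb a (hMe a ha).1).1 (hEb a (hMe a ha).1).2
      (hEb b (hMe b hb).1).1 (hEb b (hMe b hb).1).2
  have hWs : PySem.List.sorted2 W (fun item => pvWidgetGroup item.2) (fun item => item.1)
      = PySem.List.sorted W (fun item => pvWidgetGroup item.2 * n + item.1) := by
    refine pv_sorted2_eq_sorted _ _ _ _ (fun a ha b hb => ?_)
    exact pv_lex_affine _ _ _ _ n (hEb a (hWe a ha).1).1 (hEb a (hWe a ha).1).2
      (hEb b (hWe b hb).1).1 (hEb b (hWe b hb).1).2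
  rw [hB, hMs, hWs]
  -- name the two sorted halves
  set SM := PySem.List.sorted M (fun item => pvMediaOrder item.2 * n + item.1) with hSM
  set SW := PySem.List.sorted W (fun item => pvWidgetGroup item.2 * n + item.1) with hSW
  have hSMm : ∀ ip ∈ SM, ip ∈ M := fun ip h =>
    (PySem.List.mem_sorted _ _ _ _).1 h
  have hSWm : ∀ ip ∈ SW, ip ∈ W := fun ip h =>
    (PySem.List.mem_sorted _ _ _ _).1 h
  -- distinct indices inside each half
  have hEne : E.Pairwise (fun p q : Int × List (String × String) => p.1 ≠ q.1) :=
    (PySem.List.pairwise_lt_enumerate params 0).imp (fun h => ne_of_lt h)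
  have hMne : SM.Pairwise (fun p q : Int × List (String × String) => p.1 ≠ q.1) := by
    have : M.Pairwise (fun p q : Int × List (String × String) => p.1 ≠ q.1) := hEne.filter _
    exact ((PySem.List.sorted_perm M _ false).pairwise_iff
      (fun h => Ne.symm h)).2 this
  have hWne : SW.Pairwise (fun p q : Int × List (String × String) => p.1 ≠ q.1) := by
    have : W.Pairwise (fun p q : Int × List (String × String) => p.1 ≠ q.1) := hEne.filter _
    exact ((PySem.List.sorted_perm W _ false).pairwise_iff
      (fun h => Ne.symm h)).2 this
  -- the concatenation is strictly increasing under the global key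
  have hkey : (SM ++ SW).Pairwise
      (fun a b : Int × List (String × String) =>
        pvRank a.2 * n + a.1 < pvRank b.2 * n + b.1) := by
    rw [List.pairwise_append]
    refine ⟨?_, ?_, ?_⟩
    · have hle := PySem.List.sorted_pairwise M (fun item => pvMediaOrder item.2 * n + item.1)
      have hand := hle.and hMne
      refine hand.imp_of_mem (fun {a b} ha hb hab => ?_)
      have haM := hMe a (hSMm a ha); have hbM := hMe b (hSMm b hb)
      have hba := pv_rank_media a.2 haM.2; have hbb := pv_rank_media b.2 hbM.2
      have haE := hEb a haM.1; have hbE := hEb b hbM.1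
      rw [hba.1, hbb.1]
      rcases lt_or_eq_of_le hab.1 with h | h
      · exact h
      · exact absurd (pv_affine_index _ _ _ _ n haE.1 haE.2 hbE.1 hbE.2 h) hab.2
    · have hle := PySem.List.sorted_pairwise W (fun item => pvWidgetGroup item.2 * n + item.1)
      have hand := hle.and hWne
      refine hand.imp_of_mem (fun {a b} ha hb hab => ?_)
      have haW := hWe a (hSWm a ha); have hbW := hWe b (hSWm b hb)
      have haE := hEb a haW.1; have hbE := hEb b hbW.1
      rw [pv_rank_widget a.2 haW.2, pv_rank_widget b.2 hbW.2]
      rcases lt_or_eq_of_le hab.1 with h | h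
      · linarith
      · exact absurd (pv_affine_index _ _ _ _ n haE.1 haE.2 hbE.1 hbE.2 h) hab.2
    · intro a ha b hb
      have haM := hMe a (hSMm a ha); have hbW := hWe b (hSWm b hb)
      have hra := pv_rank_media a.2 haM.2
      have hrb := pv_rank_widget b.2 hbW.2
      have hgb := pv_widgetGroup_bounds b.2
      have haE := hEb a haM.1; have hbE := hEb b hbW.1
      rw [hra.1, hrb]
      have hn : 0 ≤ n := le_trans haE.1 (le_of_lt haE.2)
      have h1 : pvMediaOrder a.2 * n ≤ 2 * n := mul_le_mul_of_nonneg_right hra.2.2 hn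
      have h2 : 0 ≤ pvWidgetGroup b.2 * n := mul_nonneg hgb.1 hn
      linarith [haE.1, haE.2, hbE.1]
  -- the concatenation is a permutation of E
  have hperm : (SM ++ SW).Perm E := by
    rw [hSM, hSW]
    refine List.Perm.trans (List.Perm.append (PySem.List.sorted_perm M _ false)
      (PySem.List.sorted_perm W _ false)) ?_
    rw [hM, hW]
    exact List.filter_append_perm _ E
  have := PySem.List.sorted_eq_of_perm_of_pairwise_lt E (SM ++ SW)
    (fun ip => pvRank ip.2 * n + ip.1) hperm hkey
  rw [this, List.map_append]

-- ===== VERDICT (by name: the statement is the Claim_ definition above) =====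
theorem sorted_params_py_spec : Claim_equal_sorted_params_py := by
  intro model_def _
  unfold Spec_sorted_params_py sorted_params_py sorted_params_py_alt
  set params := (List.lookup "params" model_def).getD [] with hp
  have hpart := pv_partition_foldl (fun ip : Int × List (String × String) => pvIsMedia ip.2)
    (PySem.List.enumerate params) [] []
  simp only [List.nil_append] at hpart
  simp only [hpart]
  exact (pv_core params).symm
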